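-- pv_equiv track=rewrite | github.com/mushfiqur47/HackerRankProjectEuler | Project Euler #250: 250250.py | compute
-- ===== SOURCE A (Python) =====
-- def compute(n, k):
--
--     subsets, offsets = [0]*k, [0]*k
--
--     for i in range(1,n+1):
--         subsets[pow(i, i, k)] += 1
--
--     offsets[0] = 1
--     for i in range(k):
--         for j in range(subsets[i]):
--             offsets = [(offsets[j] + offsets[(j-i)]) % 10**9 for j in range(k)]
--
--     return str(offsets[0]-1)
-- ===== SOURCE B (Python) =====
-- def compute(n, k):
--     M = 10**9
--
--     counts = [0]*k
--     for i in range(1, n+1):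
--         counts[pow(i, i, k)] += 1
--
--     def one():
--         p = [0]*k
--         p[0] = 1
--         return p
--
--     def one_plus_x(r):
--         p = [0]*k
--         p[0] += 1
--         p[r] += 1
--         return p
--
--     def polymul(a, b):
--         # cyclic convolution mod x^k - 1: accumulate b's nonzero coefficients
--         # as rotations of a, then reduce mod 10**9 once per coefficient
--         res = [0]*k
--         for y, by in enumerate(b):
--             if by:
--                 rot = a[-y:] + a[:-y]
--                 res = [c + av * by for c, av in zip(res, rot)]
--         return [c % M for c in res]
--
--     def polypow(p, e):
--         if e == 0:
--             return one()
--         if e == 1: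
--             return p
--         r = polypow(polymul(p, p), e // 2)
--         return polymul(r, p) if e % 2 == 1 else r
--
--     offsets = one()
--     for r, c in enumerate(counts):
--         if c:
--             offsets = polymul(offsets, polypow(one_plus_x(r), c))
--     return str(offsets[0] - 1)
-- ===== Notes on version B (the rewrite author's own statement) =====
-- stated objective: alternative
-- what changed: A applies one O(k) shift-and-add DP pass per element i = 1..n; B groups equal residues (A's own counts array) and multiplies the DP vector by (1+x^r)^count in Z[x]/(x^k-1, 10^9) via binary exponentiation of a sparse-aware cyclic convolution, replacing count sequential passes by O(log count) polynomial products per residue.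
import Mathlib
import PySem

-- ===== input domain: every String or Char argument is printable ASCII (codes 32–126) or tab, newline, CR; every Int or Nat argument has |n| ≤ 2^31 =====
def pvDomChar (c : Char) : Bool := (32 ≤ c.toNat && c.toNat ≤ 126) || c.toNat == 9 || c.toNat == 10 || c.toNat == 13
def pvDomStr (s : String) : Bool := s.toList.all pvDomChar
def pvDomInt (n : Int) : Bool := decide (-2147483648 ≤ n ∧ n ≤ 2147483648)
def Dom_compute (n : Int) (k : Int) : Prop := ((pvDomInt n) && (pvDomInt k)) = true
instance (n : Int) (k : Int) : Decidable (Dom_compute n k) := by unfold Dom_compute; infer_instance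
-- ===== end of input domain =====

-- Alternative algorithm: A applies one shift-and-add DP pass per element i = 1..n; B instead
-- multiplies the DP vector by (1+x^r)^count mod (x^k - 1, 10^9), one binary exponentiation
-- of a cyclic polynomial product per residue class.

-- ===== PORT A =====
-- counting loop `for i in range(1,n+1): subsets[pow(i,i,k)] += 1` (textually identical in Source A and Source B)
def pvCounts (n : Int) (k : Int) : List Int :=
  (PySem.List.pyRange 1 (n+1)).foldl
    (fun s i =>
      PySem.List.pySetD s (PySem.Int.powMod i i.toNat k)
        (PySem.List.pyGetD s (PySem.Int.powMod i i.toNat k) 0 + 1))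
    (List.replicate k.toNat 0)

-- elementwise (a + b) % 10**9 over two parallel lists (tail recursive so one DP pass
-- evaluates in O(k) like the Python list comprehension; exact zipWith semantics)
def pvZipModAdd (x y acc : List Int) : List Int :=
  match x, y with
  | a :: x', b :: y' => pvZipModAdd x' y' (PySem.Int.mod (a + b) (10 ^ 9) :: acc)
  | _, _ => acc.reverse

-- one DP pass: offsets = [(offsets[j] + offsets[(j-i)]) % 10**9 for j in range(k)].
-- Reading offsets[j-i] for all j = 0..k-1 in order (Python wrap-around indexing, 0 ≤ i < k
-- = len(offsets) whenever the loop body runs) is exactly the rotation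
-- offsets[k-i:] + offsets[:k-i]; ported in that form so one pass stays O(k), as in Python.
def pvStepA (k : Int) (v : List Int) (i : Int) : List Int :=
  let m := v.length - i.toNat
  pvZipModAdd v (v.drop m ++ v.take m) []

-- `for i in range(k): for j in range(subsets[i]): ...` visits exactly the pairs
-- (i, subsets[i]); ported as a fold over subsets carrying the index i as a counter
-- (exact since len(subsets) == k), so the indexed read does not cost O(k) per step.
def compute (n : Int) (k : Int) : String :=
  let subsets := pvCounts n k
  let offsets0 := PySem.List.pySetD (List.replicate k.toNat (0 : Int)) 0 1
  let offsets :=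
    (subsets.foldl
      (fun (st : List Int × Int) c =>
        ((PySem.List.pyRange 0 c).foldl (fun w _ => pvStepA k w st.2) st.1, st.2 + 1))
      (offsets0, (0 : Int))).1
  PySem.Int.toStr (PySem.List.pyGetD offsets 0 0 - 1)

-- ===== PORT B =====
def pvOne (k : Int) : List Int :=
  PySem.List.pySetD (List.replicate k.toNat (0 : Int)) 0 1

-- p = [0]*k; p[0] += 1; p[r] += 1
def pvOnePlus (k : Int) (r : Int) : List Int :=
  let p := List.replicate k.toNat (0 : Int)
  let p := PySem.List.pySetD p 0 (PySem.List.pyGetD p 0 0 + 1)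
  PySem.List.pySetD p r (PySem.List.pyGetD p r 0 + 1)

-- res = [c + av*by for c, av in zip(res, rot)]: elementwise c + av*w, tail recursive
def pvScaleAcc (w : Int) (x y acc : List Int) : List Int :=
  match x, y with
  | c :: x', av :: y' => pvScaleAcc w x' y' ((c + av * w) :: acc)
  | _, _ => acc.reverse

-- cyclic convolution mod x^k - 1, accumulating b's nonzero coefficients as rotations
-- of a (a[-y:] + a[:-y], i.e. a read at (j-y) % k for j = 0..k-1; exact since the
-- enumerate index y — ported as a counter — satisfies 0 ≤ y < k = len(a) at every
-- call), then one % 10**9 pass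
def pvPolymul (k : Int) (a : List Int) (b : List Int) : List Int :=
  ((b.foldl
    (fun (st : List Int × Int) c =>
      ((if c == 0 then st.1
        else
          let m := a.length - st.2.toNat
          pvScaleAcc c st.1 (a.drop m ++ a.take m) []), st.2 + 1))
    (List.replicate k.toNat 0, (0 : Int))).1).map (fun c => PySem.Int.mod c (10 ^ 9))

def pvPolypow (k : Int) (p : List Int) (e : Nat) : List Int :=
  if e = 0 then pvOne k
  else if e = 1 then p
  else
    let r := pvPolypow k (pvPolymul k p p) (e / 2)
    if e % 2 = 1 then pvPolymul k r p else r
termination_by e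
decreasing_by all_goals omega

-- `for r, c in enumerate(counts): if c: ...` ported as a fold over counts carrying
-- the residue r as a counter
def compute_alt (n : Int) (k : Int) : String :=
  let counts := pvCounts n k
  let offsets :=
    (counts.foldl
      (fun (st : List Int × Int) c =>
        ((if c == 0 then st.1
          else pvPolymul k st.1 (pvPolypow k (pvOnePlus k st.2) c.toNat)), st.2 + 1))
      (pvOne k, (0 : Int))).1
  PySem.Int.toStr (PySem.List.pyGetD offsets 0 0 - 1)

-- ===== PRECONDITION & SPEC =====
-- Pre_ excludes only k ≤ 0, where the Python A raises (pow(i,i,0) is a ValueError for n ≥ 1,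
-- and offsets[0] / subsets[...] an IndexError otherwise); B raises there as well.
def Pre_compute (n : Int) (k : Int) : Prop := 1 ≤ k
instance (n : Int) (k : Int) : Decidable (Pre_compute n k) := by unfold Pre_compute; infer_instance
def pvWitness_compute : Int × Int := (6, 4)

def Spec_compute (n : Int) (k : Int) (out : String) : Prop := out = compute_alt n k
instance (n : Int) (k : Int) (out : String) : Decidable (Spec_compute n k out) := by unfold Spec_compute; infer_instance

-- ===== CLAIM (what is proved, stated in full; the proofs are below) =====
def Claim_equal_compute : Prop := ∀ (n : Int) (k : Int), Dom_compute n k → Pre_compute n k → Spec_compute n k (compute n k)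

-- ===== LEMMAS AND PROOFS =====
-- index-formula twins of the two ports' kernels (same values, written as one
-- comprehension over range(k) with wrap-around reads; the ports are proved equal to them)

def pvStepF (k : Int) (v : List Int) (i : Int) : List Int :=
  (PySem.List.pyRange 0 k).map
    (fun j => PySem.Int.mod (PySem.List.pyGetD v j 0 + PySem.List.pyGetD v (j - i) 0) (10 ^ 9))

def pvPolymulF (k : Int) (a : List Int) (b : List Int) : List Int :=
  let nz := (PySem.List.enumerate b).filter (fun q => !(q.2 == 0))
  (PySem.List.pyRange 0 k).map
    (fun j =>
      PySem.Int.mod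
        ((nz.map (fun q => PySem.List.pyGetD a (PySem.Int.mod (j - q.1) k) 0 * q.2)).sum)
        (10 ^ 9))

-- ---- proof-side view: vectors of length k over Z/10^9 with cyclic convolution ----

def pvGood (K : Nat) (v : List Int) : Prop :=
  v.length = K ∧ ∀ a ∈ v, 0 ≤ a ∧ a < 10 ^ 9

def pvPhi (K : Nat) (v : List Int) : Fin K → ZMod 1000000000 :=
  fun j => ((v.getD j.val 0 : Int) : ZMod 1000000000)

def pvCmul {K : Nat} (f g : Fin K → ZMod 1000000000) : Fin K → ZMod 1000000000 :=
  fun j => ∑ x : Fin K, f (j - x) * g x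

def pvCone {K : Nat} : Fin K → ZMod 1000000000 :=
  fun j => if (j : Nat) = 0 then 1 else 0

def pvCpow {K : Nat} (f : Fin K → ZMod 1000000000) : Nat → (Fin K → ZMod 1000000000)
  | 0 => pvCone
  | e + 1 => pvCmul (pvCpow f e) f

theorem pvCmul_comm {K : Nat} [NeZero K] (f g : Fin K → ZMod 1000000000) :
    pvCmul f g = pvCmul g f := by
  funext j
  simp only [pvCmul]
  refine Fintype.sum_equiv (Equiv.subLeft j) _ _ (fun x => ?_)
  simp [Equiv.subLeft, mul_comm]

theorem pvCmul_assoc {K : Nat} [NeZero K] (f g h : Fin K → ZMod 1000000000) :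
    pvCmul (pvCmul f g) h = pvCmul f (pvCmul g h) := by
  funext j
  simp only [pvCmul, Finset.sum_mul, Finset.mul_sum]
  conv_rhs => rw [Finset.sum_comm]
  refine Finset.sum_congr rfl (fun x _ => ?_)
  refine Fintype.sum_equiv (Equiv.addRight x) _ _ (fun a => ?_)
  simp only [Equiv.coe_addRight]
  rw [add_sub_cancel_right,
    show j - (a + x) = j - x - a by rw [sub_add_eq_sub_sub, sub_right_comm], mul_assoc]

theorem pv_sum_pick {K : Nat} [NeZero K] (f : Fin K → ZMod 1000000000) (c : Fin K) :
    (∑ x : Fin K, f x * (if x = c then 1 else 0)) = f c := by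
  have h1 : ∀ x : Fin K, f x * (if x = c then 1 else 0) = if x = c then f x else 0 := by
    intro x; by_cases hx : x = c <;> simp [hx]
  rw [Finset.sum_congr rfl (fun x _ => h1 x), Finset.sum_ite_eq' Finset.univ c f]
  simp

theorem pvCmul_cone {K : Nat} [NeZero K] (f : Fin K → ZMod 1000000000) :
    pvCmul f pvCone = f := by
  funext j
  simp only [pvCmul, pvCone]
  have h1 : ∀ x : Fin K, f (j - x) * (if ((x : Fin K) : Nat) = 0 then (1 : ZMod 1000000000) else 0)
      = f (j - x) * (if x = 0 then 1 else 0) := by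
    intro x; simp [Fin.val_eq_zero_iff]
  rw [Finset.sum_congr rfl (fun x _ => h1 x), pv_sum_pick (fun x => f (j - x)) 0, sub_zero]

theorem pvCone_cmul {K : Nat} [NeZero K] (f : Fin K → ZMod 1000000000) :
    pvCmul pvCone f = f := by rw [pvCmul_comm, pvCmul_cone]

theorem pvCpow_one {K : Nat} [NeZero K] (f : Fin K → ZMod 1000000000) :
    pvCpow f 1 = f := by
  show pvCmul pvCone f = f
  exact pvCone_cmul f

theorem pvCpow_sq {K : Nat} [NeZero K] (f : Fin K → ZMod 1000000000) (m : Nat) :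
    pvCpow (pvCmul f f) m = pvCpow f (2 * m) := by
  induction m with
  | zero => rfl
  | succ m ih =>
    show pvCmul (pvCpow (pvCmul f f) m) (pvCmul f f) = pvCpow f (2 * (m + 1))
    rw [ih]
    have h2 : 2 * (m + 1) = (2 * m + 1) + 1 := by omega
    rw [h2]
    show _ = pvCmul (pvCmul (pvCpow f (2 * m)) f) f
    rw [pvCmul_assoc]

-- ---- casts and injectivity ----

theorem pv_cast_mod (a : Int) :
    ((PySem.Int.mod a (10 ^ 9) : Int) : ZMod 1000000000) = (a : ZMod 1000000000) := by
  rw [PySem.Int.mod_eq_emod_of_pos (by norm_num), show ((10:Int) ^ 9) = 1000000000 by norm_num]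
  have h0 : ((1000000000 : Int) : ZMod 1000000000) = 0 := by decide
  calc ((a % (1000000000 : Int) : Int) : ZMod 1000000000)
      = ((a - 1000000000 * (a / 1000000000) : Int) : ZMod 1000000000) := by rw [Int.emod_def]
    _ = (a : ZMod 1000000000) - ((1000000000 : Int) : ZMod 1000000000)
          * ((a / 1000000000 : Int) : ZMod 1000000000) := by push_cast; ring
    _ = (a : ZMod 1000000000) := by rw [h0]; ring

theorem pv_cast_inj {u v : Int} (hu : 0 ≤ u ∧ u < 10 ^ 9) (hv : 0 ≤ v ∧ v < 10 ^ 9)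
    (h : (u : ZMod 1000000000) = (v : ZMod 1000000000)) : u = v := by
  rw [ZMod.intCast_eq_intCast_iff] at h
  have h2 : u % ((1000000000 : Nat) : Int) = v % ((1000000000 : Nat) : Int) := h
  rw [Int.emod_eq_of_lt hu.1 (by exact_mod_cast hu.2),
    Int.emod_eq_of_lt hv.1 (by exact_mod_cast hv.2)] at h2
  exact h2

theorem pv_inj {K : Nat} {u v : List Int} (hu : pvGood K u) (hv : pvGood K v)
    (h : pvPhi K u = pvPhi K v) : u = v := by
  obtain ⟨hul, hue⟩ := hu
  obtain ⟨hvl, hve⟩ := hv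
  apply List.ext_getElem (hul.trans hvl.symm)
  intro i hi hi2
  have hiK : i < K := by omega
  have := congrFun h ⟨i, hiK⟩
  simp only [pvPhi] at this
  rw [List.getD_eq_getElem?_getD, List.getElem?_eq_getElem hi,
    List.getD_eq_getElem?_getD, List.getElem?_eq_getElem hi2] at this
  exact pv_cast_inj (hue _ (List.getElem_mem hi)) (hve _ (List.getElem_mem hi2)) this

-- ---- index bridge: Python's wrap-around index is subtraction in Fin K ----

theorem pv_sub_index (K : Nat) [NeZero K] (j y : Fin K) :
    ((((j : Nat) : Int) - ((y : Nat) : Int)) % ((K : Nat) : Int)).toNat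
      = ((j - y : Fin K) : Nat) := by
  have hval : ((j - y : Fin K) : Nat) = (K - (y : Nat) + (j : Nat)) % K := by rw [Fin.sub_def]
  rw [hval]
  have hK : 0 < K := Nat.pos_of_ne_zero (NeZero.ne K)
  have hj := j.isLt; have hy := y.isLt
  by_cases h : (y : Nat) ≤ (j : Nat)
  · have h1 : (((j : Nat) : Int) - ((y : Nat) : Int)) % ((K : Nat) : Int)
        = ((j : Nat) : Int) - ((y : Nat) : Int) :=
      Int.emod_eq_of_lt (by omega) (by omega)
    have h2 : (K - (y : Nat) + (j : Nat)) % K = (j : Nat) - (y : Nat) := by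
      have h3 : K - (y : Nat) + (j : Nat) = ((j : Nat) - (y : Nat)) + K := by omega
      rw [h3, Nat.add_mod_right, Nat.mod_eq_of_lt (by omega)]
    rw [h1]; omega
  · have h : (j : Nat) < (y : Nat) := by omega
    have h1 : (((j : Nat) : Int) - ((y : Nat) : Int)) % ((K : Nat) : Int)
        = ((j : Nat) : Int) - ((y : Nat) : Int) + ((K : Nat) : Int) := by
      have h4 : (((j : Nat) : Int) - ((y : Nat) : Int)) % ((K : Nat) : Int)
          = (((j : Nat) : Int) - ((y : Nat) : Int) + ((K : Nat) : Int) * 1) % ((K : Nat) : Int) := by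
        rw [Int.add_mul_emod_self_left]
      rw [h4, mul_one, Int.emod_eq_of_lt (by omega) (by omega)]
    have h2 : (K - (y : Nat) + (j : Nat)) % K = K - (y : Nat) + (j : Nat) :=
      Nat.mod_eq_of_lt (by omega)
    rw [h1]; omega

-- entries of a comprehension over range(k)
theorem pv_getD_map_pyRange (K : Nat) (F : Int → Int) (j : Nat) (hj : j < K) :
    ((PySem.List.pyRange 0 ((K : Nat) : Int)).map F).getD j 0 = F ((j : Nat) : Int) := by
  rw [PySem.List.pyRange_one, List.map_map]
  rw [List.getD_eq_getElem?_getD, List.getElem?_map, List.getElem?_range (by simpa using hj)]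
  simp

theorem pv_len_map_pyRange (K : Nat) (F : Int → Int) :
    ((PySem.List.pyRange 0 ((K : Nat) : Int)).map F).length = K := by
  rw [List.length_map, PySem.List.length_pyRange_one]; simp

-- the wrap-around read offsets[j - r] of A's comprehension
theorem pv_getD_wrap (K : Nat) [NeZero K] (v : List Int) (hv : v.length = K) (j r : Fin K) :
    PySem.List.pyGetD v (((j : Nat) : Int) - ((r : Nat) : Int)) 0
      = v.getD ((j - r : Fin K) : Nat) 0 := by
  have hK : 0 < K := Nat.pos_of_ne_zero (NeZero.ne K)
  rw [← pv_sub_index K j r]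
  by_cases h : (r : Nat) ≤ (j : Nat)
  · rw [Int.emod_eq_of_lt (by omega) (by omega)]
    exact PySem.List.pyGetD_of_nonneg v 0 (by omega)
  · have h' : (j : Nat) < (r : Nat) := by omega
    have hneg : ((j : Nat) : Int) - ((r : Nat) : Int) = -(((r : Nat) - (j : Nat) : Nat) : Int) := by
      omega
    rw [hneg, PySem.List.pyGetD_neg_natCast v ((r : Nat) - (j : Nat)) 0 (by omega) (by omega)]
    rw [← hneg]
    have h1 : (((j : Nat) : Int) - ((r : Nat) : Int)) % ((K : Nat) : Int)
        = ((v.length - ((r : Nat) - (j : Nat)) : Nat) : Int) := by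
      have h4 : (((j : Nat) : Int) - ((r : Nat) : Int)) % ((K : Nat) : Int)
          = (((j : Nat) : Int) - ((r : Nat) : Int) + ((K : Nat) : Int) * 1) % ((K : Nat) : Int) := by
        rw [Int.add_mul_emod_self_left]
      rw [h4, mul_one, Int.emod_eq_of_lt (by omega) (by omega)]
      have := j.isLt; have := r.isLt
      omega
    rw [h1]
    simp only [Int.toNat_natCast]
    rw [List.getD_eq_getElem?_getD, List.getElem?_eq_getElem (by have := r.isLt; omega)]
    rfl

-- ---- Good / length facts about the ports' building blocks ----

theorem pv_len_polymulF (K : Nat) (a b : List Int) :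
    (pvPolymulF ((K : Nat) : Int) a b).length = K := by
  simp only [pvPolymulF]; exact pv_len_map_pyRange K _

theorem pv_good_polymulF (K : Nat) (a b : List Int) :
    pvGood K (pvPolymulF ((K : Nat) : Int) a b) := by
  refine ⟨pv_len_polymulF K a b, ?_⟩
  intro x hx
  simp only [pvPolymulF] at hx
  obtain ⟨j, _, hj⟩ := List.mem_map.mp hx
  exact hj ▸ ⟨PySem.Int.mod_nonneg _ (by norm_num), PySem.Int.mod_lt _ (by norm_num)⟩

theorem pv_good_stepF (K : Nat) (v : List Int) (i : Int) :
    pvGood K (pvStepF ((K : Nat) : Int) v i) := by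
  refine ⟨pv_len_map_pyRange K _, ?_⟩
  intro x hx
  simp only [pvStepF] at hx
  obtain ⟨j, _, hj⟩ := List.mem_map.mp hx
  exact hj ▸ ⟨PySem.Int.mod_nonneg _ (by norm_num), PySem.Int.mod_lt _ (by norm_num)⟩

theorem pv_good_one (K : Nat) : pvGood K (pvOne ((K : Nat) : Int)) := by
  constructor
  · simp [pvOne, PySem.List.pySetD_of_nonneg _ _ (le_refl (0 : Int))]
  · intro x hx
    simp only [pvOne, PySem.List.pySetD_of_nonneg _ _ (le_refl (0 : Int))] at hx
    rcases List.mem_or_eq_of_mem_set hx with h | h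
    · rcases List.eq_of_mem_replicate h with rfl; norm_num
    · rcases h with rfl; norm_num

theorem pv_len_onePlus (K : Nat) (r : Int) (hr : 0 ≤ r) :
    (pvOnePlus ((K : Nat) : Int) r).length = K := by
  simp [pvOnePlus, PySem.List.pySetD_of_nonneg _ _ (le_refl (0 : Int)),
    PySem.List.pySetD_of_nonneg _ _ hr]

-- ---- φ of the ports' building blocks ----

theorem pv_phi_one (K : Nat) [NeZero K] : pvPhi K (pvOne ((K : Nat) : Int)) = pvCone := by
  have hK : 0 < K := Nat.pos_of_ne_zero (NeZero.ne K)
  funext j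
  have hj := j.isLt
  simp only [pvPhi, pvOne, pvCone, PySem.List.pySetD_of_nonneg _ _ (le_refl (0 : Int))]
  rw [List.getD_eq_getElem?_getD]
  by_cases h : (j : Nat) = 0
  · simp [h, hK]
  · simp [Ne.symm h, h, hj]

theorem pv_sum_filter {α : Type} (p : α → Bool) (f : α → Int) (l : List α)
    (h : ∀ q ∈ l, p q = false → f q = 0) :
    ((l.filter p).map f).sum = (l.map f).sum := by
  induction l with
  | nil => rfl
  | cons x l ih =>
    have ih' := ih (fun q hq hpq => h q (List.mem_cons_of_mem _ hq) hpq)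
    by_cases hx : p x
    · simp [hx, ih']
    · have hfx : f x = 0 := h x List.mem_cons_self (by simpa using hx)
      simp [hx, hfx, ih']

theorem pv_phi_polymulF (K : Nat) [NeZero K] (a b : List Int) (hb : b.length = K) :
    pvPhi K (pvPolymulF ((K : Nat) : Int) a b) = pvCmul (pvPhi K a) (pvPhi K b) := by
  have hK : 0 < K := Nat.pos_of_ne_zero (NeZero.ne K)
  funext j
  simp only [pvPhi, pvPolymulF]
  rw [pv_getD_map_pyRange K _ j.val j.isLt, pv_cast_mod]
  rw [pv_sum_filter _ _ _ (fun q _ hq => by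
    have hq2 : q.2 = 0 := by simpa using hq
    simp [hq2])]
  rw [PySem.List.enumerate_eq_map_pyRange b 0, List.map_map]
  rw [show PySem.List.len b = ((K : Nat) : Int) by rw [PySem.List.len_eq, hb]]
  rw [PySem.List.pyRange_one, List.map_map]
  rw [show (((K : Nat) : Int) - 0).toNat = K by simp]
  have hLF : ∀ (g : Nat → Int), ((List.range K).map g).sum = ∑ y ∈ Finset.range K, g y :=
    fun g => rfl
  rw [hLF]
  rw [← Fin.sum_univ_eq_sum_range]
  push_cast
  simp only [pvCmul, pvPhi, Function.comp_apply]
  refine Finset.sum_congr rfl (fun y _ => ?_)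
  rw [zero_add, PySem.Int.mod_eq_emod_of_pos (by exact_mod_cast hK)]
  rw [PySem.List.pyGetD_of_nonneg a 0 (Int.emod_nonneg _ (by exact_mod_cast hK.ne'))]
  rw [pv_sub_index K j y]
  simp [PySem.List.pyGetD_natCast]

theorem pv_onePlus_getD (K : Nat) (r : Nat) (hr : r < K) (y : Nat) (hy : y < K) :
    (pvOnePlus ((K : Nat) : Int) ((r : Nat) : Int)).getD y 0
      = (if y = 0 then 1 else 0) + (if y = r then 1 else 0) := by
  have hK : 0 < K := Nat.lt_of_le_of_lt (Nat.zero_le r) hr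
  simp only [pvOnePlus, PySem.List.pySetD_of_nonneg _ _ (le_refl (0 : Int)),
    PySem.List.pySetD_of_nonneg _ _ (Int.natCast_nonneg r), PySem.List.pyGetD_zero,
    PySem.List.pyGetD_natCast, Int.toNat_natCast, Int.toNat_zero]
  simp only [List.getD_eq_getElem?_getD, List.getElem?_set, List.getElem?_replicate,
    List.length_set, List.length_replicate, hy, hr, hK, if_true]
  split_ifs <;> first | rfl | omega

theorem pv_phi_onePlus (K : Nat) [NeZero K] (r : Fin K) (x : Fin K) :
    pvPhi K (pvOnePlus ((K : Nat) : Int) (((r : Nat) : Nat) : Int)) x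
      = (if x = 0 then 1 else 0) + (if x = r then 1 else 0) := by
  simp only [pvPhi]
  rw [pv_onePlus_getD K r r.isLt x x.isLt]
  rw [Int.cast_add, apply_ite (fun t : Int => (t : ZMod 1000000000)),
    apply_ite (fun t : Int => (t : ZMod 1000000000))]
  simp only [Int.cast_one, Int.cast_zero, Fin.val_eq_zero_iff, Fin.val_inj]

theorem pv_phi_stepF (K : Nat) [NeZero K] (v : List Int) (hv : v.length = K) (r : Fin K) :
    pvPhi K (pvStepF ((K : Nat) : Int) v ((r : Nat) : Int))
      = pvCmul (pvPhi K v) (pvPhi K (pvOnePlus ((K : Nat) : Int) ((r : Nat) : Int))) := by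
  funext j
  have hR : pvCmul (pvPhi K v) (pvPhi K (pvOnePlus ((K : Nat) : Int) ((r : Nat) : Int))) j
      = pvPhi K v j + pvPhi K v (j - r) := by
    simp only [pvCmul]
    rw [Finset.sum_congr rfl (fun x _ => by rw [pv_phi_onePlus K r x])]
    simp only [mul_add]
    rw [Finset.sum_add_distrib]
    rw [pv_sum_pick (fun x => pvPhi K v (j - x)) 0,
      pv_sum_pick (fun x => pvPhi K v (j - x)) r, sub_zero]
  rw [hR]
  simp only [pvPhi, pvStepF]
  rw [pv_getD_map_pyRange K _ j.val j.isLt, pv_cast_mod, pv_getD_wrap K v hv j r]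
  push_cast
  simp [PySem.List.pyGetD_natCast]

-- ---- the rotation ports equal the index-formula twins ----

theorem pv_rot_getD (K : Nat) [NeZero K] (a : List Int) (ha : a.length = K) (y j : Fin K) :
    (a.drop (a.length - (y : Nat)) ++ a.take (a.length - (y : Nat))).getD (j : Nat) 0
      = a.getD ((j - y : Fin K) : Nat) 0 := by
  have hK : 0 < K := Nat.pos_of_ne_zero (NeZero.ne K)
  have hj := j.isLt; have hy := y.isLt
  have hval : ((j - y : Fin K) : Nat) = (K - (y : Nat) + (j : Nat)) % K := by rw [Fin.sub_def]
  have hld : (a.drop (a.length - (y : Nat))).length = (y : Nat) := by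
    rw [List.length_drop]; omega
  by_cases h : (j : Nat) < (y : Nat)
  · have h2 : ((j - y : Fin K) : Nat) = K - (y : Nat) + (j : Nat) := by
      rw [hval, Nat.mod_eq_of_lt (by omega)]
    rw [h2, List.getD_eq_getElem?_getD, List.getElem?_append_left (by omega),
      List.getElem?_drop, List.getD_eq_getElem?_getD]
    rw [ha]
  · have h2 : ((j - y : Fin K) : Nat) = (j : Nat) - (y : Nat) := by
      rw [hval, show K - (y : Nat) + (j : Nat) = ((j : Nat) - (y : Nat)) + K by omega,
        Nat.add_mod_right, Nat.mod_eq_of_lt (by omega)]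
    rw [h2, List.getD_eq_getElem?_getD, List.getElem?_append_right (by omega),
      List.getElem?_take, hld, List.getD_eq_getElem?_getD]
    simp only [show (j : Nat) - (y : Nat) < a.length - (y : Nat) from by omega, if_true]

theorem pv_zipModAdd_eq :
    ∀ (x y acc : List Int), pvZipModAdd x y acc
      = acc.reverse ++ (x.zip y).map (fun q => PySem.Int.mod (q.1 + q.2) (10 ^ 9)) := by
  intro x
  induction x with
  | nil => intro y acc; cases y <;> simp [pvZipModAdd]
  | cons a x ih =>
    intro y acc
    cases y with
    | nil => simp [pvZipModAdd]
    | cons b y => rw [pvZipModAdd, ih]; simp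

theorem pv_scaleAcc_eq (w : Int) :
    ∀ (x y acc : List Int), pvScaleAcc w x y acc
      = acc.reverse ++ (x.zip y).map (fun c => c.1 + c.2 * w) := by
  intro x
  induction x with
  | nil => intro y acc; cases y <;> simp [pvScaleAcc]
  | cons a x ih =>
    intro y acc
    cases y with
    | nil => simp [pvScaleAcc]
    | cons b y => rw [pvScaleAcc, ih]; simp

theorem pv_zipmap_getD (x y : List Int) (F : Int × Int → Int) (i : Nat)
    (hx : i < x.length) (hy : i < y.length) :
    ((x.zip y).map F).getD i 0 = F (x.getD i 0, y.getD i 0) := by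
  have hlen : i < ((x.zip y).map F).length := by
    simp only [List.length_map, List.length_zip]; omega
  rw [List.getD_eq_getElem _ _ hlen, List.getElem_map, List.getElem_zip,
    List.getD_eq_getElem x _ hx, List.getD_eq_getElem y _ hy]

theorem pv_step_eq (K : Nat) [NeZero K] (v : List Int) (hv : v.length = K) (r : Fin K) :
    pvStepA ((K : Nat) : Int) v ((r : Nat) : Int)
      = pvStepF ((K : Nat) : Int) v ((r : Nat) : Int) := by
  have hK : 0 < K := Nat.pos_of_ne_zero (NeZero.ne K)
  have hrot : (v.drop (v.length - (r : Nat)) ++ v.take (v.length - (r : Nat))).length = K := by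
    rw [List.length_append, List.length_drop, List.length_take]; omega
  have hlenA : (pvStepA ((K : Nat) : Int) v ((r : Nat) : Int)).length = K := by
    simp only [pvStepA, Int.toNat_natCast, pv_zipModAdd_eq, List.reverse_nil, List.nil_append,
      List.length_map, List.length_zip, List.length_append, List.length_drop, List.length_take]
    omega
  have hlenF : (pvStepF ((K : Nat) : Int) v ((r : Nat) : Int)).length = K := by
    simp only [pvStepF]; exact pv_len_map_pyRange K _
  apply List.ext_getElem (hlenA.trans hlenF.symm)
  intro i h1 h2
  have hiK : i < K := by omega
  rw [← List.getD_eq_getElem _ 0 h1, ← List.getD_eq_getElem _ 0 h2]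
  have hA : (pvStepA ((K : Nat) : Int) v ((r : Nat) : Int)).getD i 0
      = PySem.Int.mod (v.getD i 0
          + (v.drop (v.length - (r : Nat)) ++ v.take (v.length - (r : Nat))).getD i 0) (10 ^ 9) := by
    simp only [pvStepA, Int.toNat_natCast, pv_zipModAdd_eq, List.reverse_nil, List.nil_append]
    exact pv_zipmap_getD v _ _ i (by omega) (by omega)
  rw [hA, pv_rot_getD K v hv r ⟨i, hiK⟩]
  rw [pvStepF, pv_getD_map_pyRange K _ i hiK, pv_getD_wrap K v hv ⟨i, hiK⟩ r]
  simp [PySem.List.pyGetD_natCast]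

-- the accumulation loop of the ported polymul, characterised entry-wise
theorem pv_mulfold (K : Nat) [NeZero K] (a : List Int) (ha : a.length = K) :
    ∀ (l : List Int) (i0 : Int) (m0 : Nat), i0 = ((m0 : Nat) : Int) → m0 + l.length ≤ K →
    ∀ (acc : List Int), acc.length = K →
    ((l.foldl (fun (st : List Int × Int) c =>
        ((if c == 0 then st.1
          else pvScaleAcc c st.1
            (a.drop (a.length - st.2.toNat) ++ a.take (a.length - st.2.toNat)) []),
         st.2 + 1)) (acc, i0)).1).length = K ∧
    ∀ j : Fin K,
      ((l.foldl (fun (st : List Int × Int) c =>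
        ((if c == 0 then st.1
          else pvScaleAcc c st.1
            (a.drop (a.length - st.2.toNat) ++ a.take (a.length - st.2.toNat)) []),
         st.2 + 1)) (acc, i0)).1).getD (j : Nat) 0
      = acc.getD (j : Nat) 0
        + ((((PySem.List.enumerate l i0).filter (fun q => !(q.2 == 0))).map
            (fun q => PySem.List.pyGetD a
              (PySem.Int.mod (((j : Nat) : Int) - q.1) ((K : Nat) : Int)) 0 * q.2)).sum) := by
  have hK : 0 < K := Nat.pos_of_ne_zero (NeZero.ne K)
  intro l
  induction l with
  | nil =>
    intro i0 m0 hi0 hb acc hacc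
    exact ⟨hacc, fun j => by simp [PySem.List.enumerate_nil]⟩
  | cons c l ih =>
    intro i0 m0 hi0 hb acc hacc
    subst hi0
    rw [List.length_cons] at hb
    have hstep : (((m0 : Nat) : Int) + 1) = (((m0 + 1 : Nat) : Nat) : Int) := by push_cast; ring
    by_cases hc : c = 0
    · have hc' : (c == 0) = true := by simpa using hc
      simp only [List.foldl_cons, hc', if_true, PySem.List.enumerate_cons, List.filter_cons,
        Bool.not_true]
      rw [hstep]
      obtain ⟨hl1, hl2⟩ := ih _ (m0 + 1) rfl (by omega) acc hacc
      refine ⟨hl1, fun j => ?_⟩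
      rw [hl2 j, ← hstep]
      simp
    · have hc' : (c == 0) = false := by simpa using hc
      have hy : m0 < K := by omega
      have hrot : (a.drop (a.length - ((m0 : Nat) : Int).toNat)
          ++ a.take (a.length - ((m0 : Nat) : Int).toNat)).length = K := by
        rw [List.length_append, List.length_drop, List.length_take]; omega
      have hacc' : (pvScaleAcc c acc
          (a.drop (a.length - ((m0 : Nat) : Int).toNat)
            ++ a.take (a.length - ((m0 : Nat) : Int).toNat)) []).length = K := by
        rw [pv_scaleAcc_eq]
        simp only [List.reverse_nil, List.nil_append, List.length_map, List.length_zip, hrot,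
          hacc, min_self]
      simp only [List.foldl_cons, hc', Bool.false_eq_true, if_false, PySem.List.enumerate_cons,
        List.filter_cons, Bool.not_false, if_true]
      rw [hstep]
      obtain ⟨hl1, hl2⟩ := ih _ (m0 + 1) rfl (by omega) _ hacc'
      refine ⟨hl1, fun j => ?_⟩
      rw [hl2 j]
      have hgetD : (pvScaleAcc c acc
          (a.drop (a.length - ((m0 : Nat) : Int).toNat)
            ++ a.take (a.length - ((m0 : Nat) : Int).toNat)) []).getD (j : Nat) 0
          = acc.getD (j : Nat) 0
            + PySem.List.pyGetD a
                (PySem.Int.mod (((j : Nat) : Int) - ((m0 : Nat) : Int)) ((K : Nat) : Int)) 0 * c := by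
        rw [pv_scaleAcc_eq]
        simp only [List.reverse_nil, List.nil_append]
        rw [pv_zipmap_getD acc _ _ (j : Nat) (by omega) (by omega)]
        have hwrap : PySem.List.pyGetD a
            (PySem.Int.mod (((j : Nat) : Int) - ((m0 : Nat) : Int)) ((K : Nat) : Int)) 0
            = (a.drop (a.length - ((m0 : Nat) : Int).toNat)
                ++ a.take (a.length - ((m0 : Nat) : Int).toNat)).getD (j : Nat) 0 := by
          rw [Int.toNat_natCast, pv_rot_getD K a ha ⟨m0, hy⟩ j,
            PySem.Int.mod_eq_emod_of_pos (by exact_mod_cast hK),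
            PySem.List.pyGetD_of_nonneg a 0 (Int.emod_nonneg _ (by exact_mod_cast hK.ne')),
            pv_sub_index K j ⟨m0, hy⟩]
        rw [hwrap]
      rw [hgetD, ← hstep, List.map_cons, List.sum_cons]
      ring

theorem pv_polymul_eq (K : Nat) [NeZero K] (a b : List Int)
    (ha : a.length = K) (hb : b.length = K) :
    pvPolymul ((K : Nat) : Int) a b = pvPolymulF ((K : Nat) : Int) a b := by
  have hK : 0 < K := Nat.pos_of_ne_zero (NeZero.ne K)
  have hacc : (List.replicate ((K : Nat) : Int).toNat (0 : Int)).length = K := by simp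
  obtain ⟨hl1, hl2⟩ := pv_mulfold K a ha b 0 0 (by norm_num) (by omega) _ hacc
  have hlen : (pvPolymul ((K : Nat) : Int) a b).length = K := by
    simpa [pvPolymul] using hl1
  apply List.ext_getElem (hlen.trans (pv_len_polymulF K a b).symm)
  intro i h1 h2
  have hiK : i < K := by omega
  rw [← List.getD_eq_getElem _ 0 h1, ← List.getD_eq_getElem _ 0 h2]
  have hL : (pvPolymul ((K : Nat) : Int) a b).getD i 0
      = PySem.Int.mod ((b.foldl (fun (st : List Int × Int) c =>
          ((if c == 0 then st.1
            else pvScaleAcc c st.1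
              (a.drop (a.length - st.2.toNat) ++ a.take (a.length - st.2.toNat)) []),
           st.2 + 1)) (List.replicate ((K : Nat) : Int).toNat (0 : Int), (0 : Int))).1.getD i 0)
          (10 ^ 9) := by
    simp only [pvPolymul]
    rw [List.getD_eq_getElem _ _ (by rw [List.length_map, hl1]; omega), List.getElem_map,
      List.getD_eq_getElem _ _ (by rw [hl1]; omega)]
  rw [hL, hl2 ⟨i, hiK⟩]
  simp only [pvPolymulF]
  rw [pv_getD_map_pyRange K _ i hiK]
  have hz : (List.replicate ((K : Nat) : Int).toNat (0 : Int)).getD i 0 = 0 := by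
    rw [List.getD_eq_getElem _ _ (by simpa using hiK), List.getElem_replicate]
  rw [hz, zero_add]

theorem pv_len_counts (n k : Int) : (pvCounts n k).length = k.toNat := by
  have h : ∀ (l : List Int) (s : List Int),
      (l.foldl (fun s i => PySem.List.pySetD s (PySem.Int.powMod i i.toNat k)
        (PySem.List.pyGetD s (PySem.Int.powMod i i.toNat k) 0 + 1)) s).length = s.length := by
    intro l
    induction l with
    | nil => intro s; rfl
    | cons x l ih => intro s; rw [List.foldl_cons, ih, PySem.List.length_pySetD]
  simp [pvCounts, h]
-- ---- lengths and φ of polypow (through the port's polymul) ----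

theorem pv_len_polypow (K : Nat) [NeZero K] (e : Nat) (p : List Int) (hp : p.length = K) :
    (pvPolypow ((K : Nat) : Int) p e).length = K := by
  induction e using Nat.strong_induction_on generalizing p with
  | _ e ih =>
    rw [pvPolypow]
    by_cases h0 : e = 0
    · simpa [h0] using (pv_good_one K).1
    by_cases h1 : e = 1
    · simpa [h0, h1] using hp
    have hmm : (pvPolymul ((K : Nat) : Int) p p).length = K := by
      rw [pv_polymul_eq K p p hp hp]; exact pv_len_polymulF K p p
    have hrec := ih (e / 2) (by omega) (pvPolymul ((K : Nat) : Int) p p) hmm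
    by_cases ho : e % 2 = 1 <;>
      simp [h0, h1, ho, hrec, pv_polymul_eq K _ p hrec hp, pv_len_polymulF K]

theorem pv_phi_polypow (K : Nat) [NeZero K] :
    ∀ (e : Nat) (p : List Int), p.length = K →
      pvPhi K (pvPolypow ((K : Nat) : Int) p e) = pvCpow (pvPhi K p) e := by
  intro e
  induction e using Nat.strong_induction_on with
  | _ e ih =>
    intro p hp
    rw [pvPolypow]
    by_cases h0 : e = 0
    · simp only [h0, if_true]
      exact (pv_phi_one K).trans (by rfl)
    by_cases h1 : e = 1
    · subst h1
      rw [if_neg h0, if_pos rfl, pvCpow_one]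
    simp only [h0, h1, if_false]
    have hmm : (pvPolymul ((K : Nat) : Int) p p).length = K := by
      rw [pv_polymul_eq K p p hp hp]; exact pv_len_polymulF K p p
    have hrec := ih (e / 2) (by omega) (pvPolymul ((K : Nat) : Int) p p) hmm
    have hrlen : (pvPolypow ((K : Nat) : Int) (pvPolymul ((K : Nat) : Int) p p) (e / 2)).length = K :=
      pv_len_polypow K (e / 2) _ hmm
    have hsq : pvPhi K (pvPolypow ((K : Nat) : Int) (pvPolymul ((K : Nat) : Int) p p) (e / 2))
        = pvCpow (pvPhi K p) (2 * (e / 2)) := by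
      rw [hrec, pv_polymul_eq K p p hp hp, pv_phi_polymulF K p p hp, pvCpow_sq]
    by_cases ho : e % 2 = 1
    · simp only [ho, if_true]
      rw [pv_polymul_eq K _ p hrlen hp, pv_phi_polymulF K _ p hp, hsq]
      conv_rhs => rw [show e = (2 * (e / 2)) + 1 by omega]
      rfl
    · simp only [ho, if_false]
      rw [hsq, show 2 * (e / 2) = e by omega]

-- ---- A's inner loop: c iterations of one DP pass ----

theorem pv_iterA (K : Nat) [NeZero K] (r : Fin K) :
    ∀ (c : Nat) (v : List Int), pvGood K v →
      pvGood K ((fun w => pvStepA ((K : Nat) : Int) w ((r : Nat) : Int))^[c] v) ∧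
      pvPhi K ((fun w => pvStepA ((K : Nat) : Int) w ((r : Nat) : Int))^[c] v)
        = pvCmul (pvPhi K v)
            (pvCpow (pvPhi K (pvOnePlus ((K : Nat) : Int) ((r : Nat) : Int))) c) := by
  intro c
  induction c with
  | zero =>
    intro v hv
    exact ⟨hv, (pvCmul_cone (pvPhi K v)).symm⟩
  | succ c ih =>
    intro v hv
    obtain ⟨hg, hphi⟩ := ih v hv
    rw [Function.iterate_succ_apply']
    rw [pv_step_eq K _ hg.1 r]
    refine ⟨pv_good_stepF K _ _, ?_⟩
    rw [pv_phi_stepF K _ hg.1 r, hphi]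
    show _ = pvCmul (pvPhi K v) (pvCmul (pvCpow _ c) _)
    rw [pvCmul_assoc]

-- ---- the two per-residue updates compute the same list ----

theorem pv_step_agree (K : Nat) [NeZero K] (r : Fin K) (c : Int) (v : List Int)
    (hv : pvGood K v) :
    (PySem.List.pyRange 0 c).foldl (fun w _ => pvStepA ((K : Nat) : Int) w ((r : Nat) : Int)) v
      = pvPolymul ((K : Nat) : Int) v
          (pvPolypow ((K : Nat) : Int) (pvOnePlus ((K : Nat) : Int) ((r : Nat) : Int)) c.toNat)
    ∧ pvGood K ((PySem.List.pyRange 0 c).foldl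
        (fun w _ => pvStepA ((K : Nat) : Int) w ((r : Nat) : Int)) v) := by
  have hlen : (PySem.List.pyRange 0 c).length = c.toNat := by
    rw [PySem.List.length_pyRange_one]; simp
  have hplen : (pvOnePlus ((K : Nat) : Int) ((r : Nat) : Int)).length = K :=
    pv_len_onePlus K _ (Int.natCast_nonneg _)
  have hpplen : (pvPolypow ((K : Nat) : Int) (pvOnePlus ((K : Nat) : Int) ((r : Nat) : Int))
      c.toNat).length = K := pv_len_polypow K c.toNat _ hplen
  rw [List.foldl_const, hlen]
  obtain ⟨hgA, hphiA⟩ := pv_iterA K r c.toNat v hv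
  have heq : (fun w => pvStepA ((K : Nat) : Int) w ((r : Nat) : Int))^[c.toNat] v
      = pvPolymul ((K : Nat) : Int) v
          (pvPolypow ((K : Nat) : Int) (pvOnePlus ((K : Nat) : Int) ((r : Nat) : Int)) c.toNat) := by
    rw [pv_polymul_eq K v _ hv.1 hpplen]
    refine pv_inj hgA (pv_good_polymulF K _ _) ?_
    rw [hphiA, pv_phi_polymulF K v _ hpplen, pv_phi_polypow K c.toNat _ hplen]
  exact ⟨heq, heq ▸ hgA⟩

-- ---- the whole DP loop over residues ----

theorem pv_fold_agree (K : Nat) [NeZero K] :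
    ∀ (l : List Int) (i0 : Int) (m0 : Nat), i0 = ((m0 : Nat) : Int) → m0 + l.length ≤ K →
    ∀ (v : List Int), pvGood K v →
    (l.foldl (fun (st : List Int × Int) c =>
        ((PySem.List.pyRange 0 c).foldl (fun w _ => pvStepA ((K : Nat) : Int) w st.2) st.1,
         st.2 + 1)) (v, i0)).1
      = (l.foldl (fun (st : List Int × Int) c =>
          ((if c == 0 then st.1
            else pvPolymul ((K : Nat) : Int) st.1
              (pvPolypow ((K : Nat) : Int) (pvOnePlus ((K : Nat) : Int) st.2) c.toNat)),
           st.2 + 1)) (v, i0)).1 := by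
  intro l
  induction l with
  | nil => intro i0 m0 _ _ v _; rfl
  | cons c l ih =>
    intro i0 m0 hi0 hb v hv
    subst hi0
    rw [List.length_cons] at hb
    have hstep : (((m0 : Nat) : Int) + 1) = (((m0 + 1 : Nat) : Nat) : Int) := by push_cast; ring
    have hy : m0 < K := by omega
    simp only [List.foldl_cons]
    by_cases hc : c = 0
    · have hc' : (c == 0) = true := by simpa using hc
      have hA : PySem.List.pyRange 0 c = [] := by
        rw [hc]; exact PySem.List.pyRange_one_eq_nil (le_refl 0)
      rw [hA, hc']
      simp only [List.foldl_nil, if_true]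
      rw [hstep]
      exact ih _ (m0 + 1) rfl (by omega) v hv
    · have hc' : (c == 0) = false := by simpa using hc
      rw [hc']
      simp only [Bool.false_eq_true, if_false]
      obtain ⟨heq, hgood⟩ := pv_step_agree K ⟨m0, hy⟩ c v hv
      rw [show ((m0 : Nat) : Int) = (((⟨m0, hy⟩ : Fin K) : Nat) : Int) from rfl, heq, hstep]
      exact ih _ (m0 + 1) rfl (by omega) _ (heq ▸ hgood)

theorem pv_compute_eq (n k : Int) (hk : 1 ≤ k) : compute n k = compute_alt n k := by
  have hk' : 0 ≤ k := le_trans (by norm_num) hk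
  have hkK : ((k.toNat : Nat) : Int) = k := Int.toNat_of_nonneg hk'
  haveI : NeZero k.toNat := ⟨by omega⟩
  rw [← hkK]
  simp only [compute, compute_alt, pvOne, Int.toNat_natCast]
  have hgood : pvGood k.toNat (PySem.List.pySetD (List.replicate k.toNat (0 : Int)) 0 1) := by
    have h := pv_good_one k.toNat
    simp only [pvOne, Int.toNat_natCast] at h
    exact h
  have hlen : (pvCounts n ((k.toNat : Nat) : Int)).length = k.toNat := by
    rw [pv_len_counts, Int.toNat_natCast]
  rw [pv_fold_agree k.toNat (pvCounts n ((k.toNat : Nat) : Int)) 0 0 (by norm_num)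
    (by omega) _ hgood]

-- ===== VERDICT (by name: the statement is the Claim_ definition above) =====
theorem compute_spec : Claim_equal_compute := by
  unfold Claim_equal_compute
  intro n k _ hk
  exact pv_compute_eq n k hk
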